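-- pv_equiv track=rewrite | github.com/jdgalviss/autonomous_mobile_robot | semantic_nav/dev_ws/src/vision/vision/planner.py | get_motion_model
-- ===== SOURCE A (Python) =====
-- def get_motion_model(min,max):
--     # dx, dy
--     motion_model = []
--     for i in range(-max,max+1):
--         for j in range(-max,min+1):
--             if((j == -max or j==min) or (i == -max) or (i == max)):
--                 if(j!=0 and i!= 0):
--                     motion_model.append([i,-j])
--     # motion_model = []
--     # for i in range(-max,max):
--     #     for j in range(-max,max):
--     #         if(i != 0 and j != 0):
--     #             motion_model.append([i,-j])
--
-- #     self.motion_model = [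
-- #             #   [2, 0], #right
-- # #               [0, 2], #back
-- #             #   [-2, 0], #left
-- #               #[0, -3], # front
-- #               [-1, -2],#front-left
-- #               [-2, -2],#front-left
-- #               [-2, -1],#front-left
--
-- #               [-1, -4],#front-left
-- #               [-3, -4],#front-left
--
-- #               [-3, -1],#front-left
-- #               [-3, -2],#front-left
--
--
--
-- #                 #   [-3, -4],#front-left
-- #                 #   [-4, -4],#front-left
-- # #               [-1, 2], # back-left
-- #               [1, -2], #front-right
-- #               [2, -2], #front-right
-- #               [2, -1], #front-right
--
-- #               [1, -4],#front-right
-- #               [3, -4],#front-right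
--
-- #               [3, -1],#front-right
-- #               [3, -2],#front-right
--
-- #             #   [3, -4], #front-right
-- #             #   [4, -4], #front-right
-- # # #               [1, 1]  #back-right
--             #   ]
--     return motion_model
-- ===== SOURCE B (Python) =====
-- def get_motion_model(min, max):
--     # Enumerate only perimeter cells: full rows for i = -max / i = max,
--     # just the two border columns j = -max and j = min for every other i.
--     motion_model = []
--     for i in range(-max, max + 1):
--         if i == 0:
--             continue
--         if i == -max or i == max:
--             for j in range(-max, min + 1):
--                 if j != 0:
--                     motion_model.append([i, -j])
--         elif -max <= min:
--             if -max != 0: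
--                 motion_model.append([i, max])
--             if min != -max and min != 0:
--                 motion_model.append([i, -min])
--     return motion_model
-- ===== Notes on version B (the rewrite author's own statement) =====
-- stated objective: faster
-- what changed: Instead of scanning the full (2*max+1) x (max+min+1) grid and testing each cell for being on the border, B emits perimeter cells directly: full j-rows only for i = -max and i = max, and just the two border columns j = -max and j = min for every other i, preserving A's output order.
import Mathlib
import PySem

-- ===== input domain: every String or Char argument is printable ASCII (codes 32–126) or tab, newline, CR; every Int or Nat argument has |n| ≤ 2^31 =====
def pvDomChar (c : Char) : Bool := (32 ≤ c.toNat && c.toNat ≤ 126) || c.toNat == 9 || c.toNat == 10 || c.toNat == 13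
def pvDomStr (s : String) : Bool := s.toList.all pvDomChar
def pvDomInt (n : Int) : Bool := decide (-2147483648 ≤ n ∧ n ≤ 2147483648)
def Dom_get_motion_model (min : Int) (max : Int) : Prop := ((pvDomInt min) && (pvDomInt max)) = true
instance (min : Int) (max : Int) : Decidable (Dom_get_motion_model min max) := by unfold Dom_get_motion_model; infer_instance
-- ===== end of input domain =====

-- B enumerates only the perimeter cells directly (O(max+min)) instead of scanning the
-- whole grid and testing each cell (O(max*(max+min))); same output, same order.

-- ===== PORT A =====
-- Literal port of A: full double loop, border test on each cell.
def get_motion_model (min : Int) (max : Int) : List (List Int) :=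
  (PySem.List.pyRange (-max) (max + 1) 1).foldl (fun mm i =>
    (PySem.List.pyRange (-max) (min + 1) 1).foldl (fun mm j =>
      if (j = -max ∨ j = min) ∨ i = -max ∨ i = max then
        if j ≠ 0 ∧ i ≠ 0 then mm ++ [[i, -j]] else mm
      else mm) mm) []

-- ===== PORT B =====
-- the cells B appends during the iteration of the outer loop with value i
def altRow (min : Int) (max : Int) (i : Int) : List (List Int) :=
  if i = 0 then []
  else if i = -max ∨ i = max then
    (PySem.List.pyRange (-max) (min + 1) 1).foldl
      (fun mm j => if j ≠ 0 then mm ++ [[i, -j]] else mm) []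
  else if -max ≤ min then
    (if -max ≠ 0 then [[i, max]] else []) ++
      (if min ≠ -max ∧ min ≠ 0 then [[i, -min]] else [])
  else []

def get_motion_model_alt (min : Int) (max : Int) : List (List Int) :=
  (PySem.List.pyRange (-max) (max + 1) 1).foldl (fun mm i => mm ++ altRow min max i) []

-- ===== PRECONDITION & SPEC =====
def Spec_get_motion_model (min : Int) (max : Int) (out : List (List Int)) : Prop := out = get_motion_model_alt min max
instance (min : Int) (max : Int) (out : List (List Int)) : Decidable (Spec_get_motion_model min max out) := by unfold Spec_get_motion_model; infer_instance

-- ===== CLAIM (what is proved, stated in full; the proofs are below) =====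
def Claim_equal_get_motion_model : Prop := ∀ (min : Int) (max : Int), Dom_get_motion_model min max → Spec_get_motion_model min max (get_motion_model min max)

-- ===== LEMMAS AND PROOFS =====

-- filtering the row range for the left border column
lemma filter_left (a b : Int) (h : a < b) :
    (PySem.List.pyRange a b 1).filter (fun j => decide (j = a ∧ j ≠ 0)) =
      if a ≠ 0 then [a] else [] := by
  rw [PySem.List.pyRange_one_cons h]
  rw [List.filter_cons]
  have htail : (PySem.List.pyRange (a + 1) b 1).filter (fun j => decide (j = a ∧ j ≠ 0)) = [] := by
    apply List.filter_eq_nil_iff.mpr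
    intro j hj
    have := (PySem.List.mem_pyRange_one.mp hj).1
    simp; omega
  rw [htail]
  by_cases ha : a = 0
  · simp [ha]
  · simp [ha]

-- filtering the row range for both border columns
lemma filter_two (a b : Int) (h : a ≤ b) :
    (PySem.List.pyRange a (b + 1) 1).filter (fun j => decide ((j = a ∨ j = b) ∧ j ≠ 0)) =
      (if a ≠ 0 then [a] else []) ++ (if b ≠ a ∧ b ≠ 0 then [b] else []) := by
  rw [PySem.List.pyRange_one_succ_right h, List.filter_append]
  have hcongr : (PySem.List.pyRange a b 1).filter (fun j => decide ((j = a ∨ j = b) ∧ j ≠ 0)) =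
      (PySem.List.pyRange a b 1).filter (fun j => decide (j = a ∧ j ≠ 0)) := by
    apply List.filter_congr
    intro j hj
    have hjb : j < b := (PySem.List.mem_pyRange_one.mp hj).2
    have hne : j ≠ b := by omega
    simp [hne]

  rw [hcongr]
  rcases lt_or_eq_of_le h with hlt | heq
  · rw [filter_left a b hlt]
    by_cases ha : a = 0 <;> by_cases hb : b = 0 <;>
      simp [ha, hb, List.filter] <;> omega
  · subst heq
    rw [PySem.List.pyRange_one_eq_nil le_rfl]
    by_cases ha : a = 0 <;> simp [ha, List.filter]

-- A's inner loop, started from mm, appends exactly altRow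
lemma rowA_eq (min max i : Int) (mm : List (List Int)) :
    (PySem.List.pyRange (-max) (min + 1) 1).foldl (fun mm j =>
      if (j = -max ∨ j = min) ∨ i = -max ∨ i = max then
        if j ≠ 0 ∧ i ≠ 0 then mm ++ [[i, -j]] else mm
      else mm) mm = mm ++ altRow min max i := by
  have hbody : (fun (mm : List (List Int)) (j : Int) =>
      if (j = -max ∨ j = min) ∨ i = -max ∨ i = max then
        if j ≠ 0 ∧ i ≠ 0 then mm ++ [[i, -j]] else mm
      else mm) = (fun mm j =>
      if (((j = -max ∨ j = min) ∨ i = -max ∨ i = max) ∧ j ≠ 0 ∧ i ≠ 0) then mm ++ [[i, -j]]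
      else mm) := by
    funext mm j
    split_ifs <;> first | rfl | tauto
  rw [hbody, PySem.List.foldl_append_ite]
  unfold altRow
  by_cases hi0 : i = 0
  · subst hi0
    have : (PySem.List.pyRange (-max) (min + 1) 1).filter
        (fun j => decide (((j = -max ∨ j = min) ∨ (0:Int) = -max ∨ (0:Int) = max) ∧ j ≠ 0 ∧ (0:Int) ≠ 0)) = [] := by
      apply List.filter_eq_nil_iff.mpr
      intro j _; simp
    rw [this]
    simp
  · by_cases hib : i = -max ∨ i = max
    · have hcongr : (PySem.List.pyRange (-max) (min + 1) 1).filter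
          (fun j => decide (((j = -max ∨ j = min) ∨ i = -max ∨ i = max) ∧ j ≠ 0 ∧ i ≠ 0)) =
          (PySem.List.pyRange (-max) (min + 1) 1).filter (fun j => decide (j ≠ 0)) := by
        apply List.filter_congr
        intro j _
        have hm : max ≠ 0 := by rcases hib with h | h <;> omega
        rcases hib with h | h <;> simp [h, hm]
      rw [hcongr]
      rw [PySem.List.foldl_append_ite (p := fun j => j ≠ (0:Int)) (f := fun j => [i, -j])]
      simp [hi0, hib]
    · -- middle row
      have hcongr : (PySem.List.pyRange (-max) (min + 1) 1).filter
          (fun j => decide (((j = -max ∨ j = min) ∨ i = -max ∨ i = max) ∧ j ≠ 0 ∧ i ≠ 0)) =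
          (PySem.List.pyRange (-max) (min + 1) 1).filter (fun j => decide ((j = -max ∨ j = min) ∧ j ≠ 0)) := by
        apply List.filter_congr
        intro j _
        have h1 : i ≠ -max := fun h => hib (Or.inl h)
        have h2 : i ≠ max := fun h => hib (Or.inr h)
        simp [h1, h2, hi0]
      rw [hcongr]
      by_cases hr : -max ≤ min
      · rw [filter_two (-max) min hr]
        simp only [hi0, hib, if_pos hr]
        by_cases ha : -max = 0 <;> by_cases hb : min = -max <;> by_cases hc : min = 0 <;>
          simp [ha, hb, hc]
      · rw [PySem.List.pyRange_one_eq_nil (by omega)]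
        simp [hi0, hib, hr]

-- ===== VERDICT (by name: the statement is the Claim_ definition above) =====
theorem get_motion_model_spec : Claim_equal_get_motion_model := by
  intro min max _
  unfold Spec_get_motion_model get_motion_model get_motion_model_alt
  congr 1
  funext mm i
  exact rowA_eq min max i mm
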